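-- pv_equiv track=rewrite | github.com/arialakh/ImplicitGenderBias | GenderAnalysis.py | predict_resume_gender
-- ===== SOURCE A (Python) =====
-- import string
--
-- def predict_word_gender(word):
--     gendered_dict = {
--         "Male": {"active", "adventurous", "aggress", "ambitio",
--                  "analy", "assert", "athlet", "autonom", "battle",
--                  "boast", "challeng", "champion", "compet",
--                  "confident", "courag", "decid", "decision",
--                  "decisive", "defend", "determin", "domina",
--                  "dominant", "driven", "fearless", "fight",
--                  "force", "greedy", "head-strong", "headstrong",
--                  "hierarch", "hostil", "impulsive", "independen",
--                  "individual", "intellect", "lead", "logic",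
--                  "objective", "opinion", "outspoken", "persist",
--                  "principle", "reckless", "self-confiden",
--                  "self-relian", "self-sufficien", "selfconfiden",
--                  "selfrelian", "selfsufficien", "stubborn",
--                  "superior", "unreasonab"},
--         "Female": {"agree", "affectionate", "child", "cheer",
--                    "collab", "commit", "communal", "compassion",
--                    "connect", "considerate", "cooperat",
--                    "co-operat", "depend", "emotiona", "empath",
--                    "feel", "flatterable", "gentle", "honest",
--                    "interpersonal", "interdependen",
--                    "interpersona", "inter-personal",
--                    "inter-dependen", "inter-persona", "kind",
--                    "kinship", "loyal", "modesty", "nag", "nurtur",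
--                    "pleasant", "polite", "quiet", "respon",
--                    "sensitiv", "submissive", "support", "sympath",
--                    "tender", "together", "trust", "understand",
--                    "warm", "whin", "enthusias", "inclusive",
--                    "yield", "share", "sharin"}
--     }
--
--     for masculine_word in gendered_dict["Male"]:
--         # testing if the word to test begins with the masculine word
--         if len(masculine_word) <= len(word) and masculine_word == word[:len(masculine_word)]:
--             return "Male"
--
--     for feminine_word in gendered_dict["Female"]:
--         # testing if the word to test begins with the masculine word
--         if len(feminine_word) <= len(word) and feminine_word == word[:len(feminine_word)]:
--             return "Female"
--
--     return "N/A"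
--
-- def predict_resume_gender(resume):
--     # the number of male/female words in the resume
--     male_count = 0
--     female_count = 0
--
--     for word in resume.split():
--         # making all words the same format
--         word = word.lower()
--         word.strip(string.digits + string.punctuation)
--
--         # predicting the gender of the word
--         result = predict_word_gender(word)
--         if result == "Male":
--             male_count += 1
--         elif result == "Female":
--             female_count += 1
--
--     return male_count, female_count
-- ===== SOURCE B (Python) =====
-- # B: instead of scanning every gendered prefix per word, probe the word's own
-- # prefixes (lengths 1..MAXLEN) against hash sets built once from two flat strings.
--
-- _MALE = frozenset("active,adventurous,aggress,ambitio,analy,assert,athlet,autonom,battle,boast,challeng,champion,compet,confident,courag,decid,decision,decisive,defend,determin,domina,dominant,driven,fearless,fight,force,greedy,head-strong,headstrong,hierarch,hostil,impulsive,independen,individual,intellect,lead,logic,objective,opinion,outspoken,persist,principle,reckless,self-confiden,self-relian,self-sufficien,selfconfiden,selfrelian,selfsufficien,stubborn,superior,unreasonab".split(","))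
--
-- _FEMALE = frozenset("agree,affectionate,child,cheer,collab,commit,communal,compassion,connect,considerate,cooperat,co-operat,depend,emotiona,empath,feel,flatterable,gentle,honest,interpersonal,interdependen,interpersona,inter-personal,inter-dependen,inter-persona,kind,kinship,loyal,modesty,nag,nurtur,pleasant,polite,quiet,respon,sensitiv,submissive,support,sympath,tender,together,trust,understand,warm,whin,enthusias,inclusive,yield,share,sharin".split(","))
--
-- _MAXLEN = max(map(len, _MALE | _FEMALE))
--
--
-- def _classify(word):
--     if any(word[:k] in _MALE for k in range(1, _MAXLEN + 1)):
--         return "Male"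
--     if any(word[:k] in _FEMALE for k in range(1, _MAXLEN + 1)):
--         return "Female"
--     return "N/A"
--
--
-- def predict_resume_gender(resume):
--     genders = [_classify(w.lower()) for w in resume.split()]
--     return genders.count("Male"), genders.count("Female")
-- ===== Notes on version B (the rewrite author's own statement) =====
-- stated objective: idiomatic
-- what changed: Instead of scanning all ~100 gendered prefixes per word, B builds frozensets of the prefixes once (split from two flat strings) and classifies a word by probing its own prefixes word[:1..14] with hash-set membership; counts are then taken with list.count over the classified words.
import Mathlib
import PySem

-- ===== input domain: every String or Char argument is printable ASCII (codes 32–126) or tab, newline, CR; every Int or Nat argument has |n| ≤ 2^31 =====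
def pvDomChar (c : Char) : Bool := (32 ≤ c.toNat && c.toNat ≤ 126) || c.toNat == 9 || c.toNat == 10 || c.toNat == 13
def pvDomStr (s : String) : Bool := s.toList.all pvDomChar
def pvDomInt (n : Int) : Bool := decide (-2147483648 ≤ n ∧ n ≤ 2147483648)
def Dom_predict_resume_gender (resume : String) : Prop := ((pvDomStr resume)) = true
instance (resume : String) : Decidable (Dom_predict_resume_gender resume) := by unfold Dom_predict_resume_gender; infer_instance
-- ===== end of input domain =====

-- B replaces A's scan over every gendered prefix per word by hash-set lookups of the
-- word's own prefixes (lengths 1..max prefix length), the sets built once by splitting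
-- two flat comma-separated strings; same return value, no side effects.

-- ===== PORT A =====
-- gendered_dict["Male"] / ["Female"]: the set literals, element by element
def pvMaleWords : PySem.Set (List Char) :=
  ["active".toList, "adventurous".toList, "aggress".toList, "ambitio".toList,
   "analy".toList, "assert".toList, "athlet".toList, "autonom".toList,
   "battle".toList, "boast".toList, "challeng".toList, "champion".toList,
   "compet".toList, "confident".toList, "courag".toList, "decid".toList,
   "decision".toList, "decisive".toList, "defend".toList, "determin".toList,
   "domina".toList, "dominant".toList, "driven".toList, "fearless".toList,
   "fight".toList, "force".toList, "greedy".toList, "head-strong".toList,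
   "headstrong".toList, "hierarch".toList, "hostil".toList, "impulsive".toList,
   "independen".toList, "individual".toList, "intellect".toList, "lead".toList,
   "logic".toList, "objective".toList, "opinion".toList, "outspoken".toList,
   "persist".toList, "principle".toList, "reckless".toList, "self-confiden".toList,
   "self-relian".toList, "self-sufficien".toList, "selfconfiden".toList,
   "selfrelian".toList, "selfsufficien".toList, "stubborn".toList,
   "superior".toList, "unreasonab".toList]

def pvFemaleWords : PySem.Set (List Char) :=
  ["agree".toList, "affectionate".toList, "child".toList, "cheer".toList,
   "collab".toList, "commit".toList, "communal".toList, "compassion".toList,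
   "connect".toList, "considerate".toList, "cooperat".toList, "co-operat".toList,
   "depend".toList, "emotiona".toList, "empath".toList, "feel".toList,
   "flatterable".toList, "gentle".toList, "honest".toList, "interpersonal".toList,
   "interdependen".toList, "interpersona".toList, "inter-personal".toList,
   "inter-dependen".toList, "inter-persona".toList, "kind".toList,
   "kinship".toList, "loyal".toList, "modesty".toList, "nag".toList,
   "nurtur".toList, "pleasant".toList, "polite".toList, "quiet".toList,
   "respon".toList, "sensitiv".toList, "submissive".toList, "support".toList,
   "sympath".toList, "tender".toList, "together".toList, "trust".toList,
   "understand".toList, "warm".toList, "whin".toList, "enthusias".toList,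
   "inclusive".toList, "yield".toList, "share".toList, "sharin".toList]

-- for masculine_word in gendered_dict["Male"]: if len(mw) <= len(word) and mw == word[:len(mw)]: return "Male"
-- (the loop's returned value does not depend on the set's iteration order: any match returns the gender)
def pvPredictWordGender (word : List Char) : String :=
  if pvMaleWords.any (fun p =>
      decide (p.length ≤ word.length) && (PySem.List.slice word none (some (p.length : Int)) == p))
  then "Male"
  else if pvFemaleWords.any (fun p =>
      decide (p.length ≤ word.length) && (PySem.List.slice word none (some (p.length : Int)) == p))
  then "Female"
  else "N/A"

def predict_resume_gender (resume : String) : Int × Int :=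
  (PySem.Chars.split₀ resume.toList).foldl
    (fun (mf : Int × Int) w =>
      let word := PySem.Chars.lower w
      -- A's `word.strip(string.digits + string.punctuation)` discards its result: a no-op
      let result := pvPredictWordGender word
      if result = "Male" then (mf.1 + 1, mf.2)
      else if result = "Female" then (mf.1, mf.2 + 1)
      else mf)
    (0, 0)

-- ===== PORT B =====
-- _MALE = frozenset("active,adventurous,…,unreasonab".split(","))
def pvMaleVocab : PySem.Set (List Char) :=
  PySem.Set.ofList (PySem.Chars.splitOn "active,adventurous,aggress,ambitio,analy,assert,athlet,autonom,battle,boast,challeng,champion,compet,confident,courag,decid,decision,decisive,defend,determin,domina,dominant,driven,fearless,fight,force,greedy,head-strong,headstrong,hierarch,hostil,impulsive,independen,individual,intellect,lead,logic,objective,opinion,outspoken,persist,principle,reckless,self-confiden,self-relian,self-sufficien,selfconfiden,selfrelian,selfsufficien,stubborn,superior,unreasonab".toList ",".toList)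

-- _FEMALE = frozenset("agree,affectionate,…,sharin".split(","))
def pvFemaleVocab : PySem.Set (List Char) :=
  PySem.Set.ofList (PySem.Chars.splitOn "agree,affectionate,child,cheer,collab,commit,communal,compassion,connect,considerate,cooperat,co-operat,depend,emotiona,empath,feel,flatterable,gentle,honest,interpersonal,interdependen,interpersona,inter-personal,inter-dependen,inter-persona,kind,kinship,loyal,modesty,nag,nurtur,pleasant,polite,quiet,respon,sensitiv,submissive,support,sympath,tender,together,trust,understand,warm,whin,enthusias,inclusive,yield,share,sharin".toList ",".toList)

-- _MAXLEN = max(map(len, _MALE | _FEMALE))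
def pvMaxLen : Nat :=
  ((PySem.Set.union pvMaleVocab pvFemaleVocab).map List.length).foldl Nat.max 0

-- any(word[:k] in _MALE for k in range(1, _MAXLEN + 1)), then the same against _FEMALE
def pvClassify (word : List Char) : String :=
  if (PySem.List.pyRange 1 ((pvMaxLen : Int) + 1) 1).any (fun k =>
      PySem.Set.contains pvMaleVocab (PySem.List.slice word none (some k)))
  then "Male"
  else if (PySem.List.pyRange 1 ((pvMaxLen : Int) + 1) 1).any (fun k =>
      PySem.Set.contains pvFemaleVocab (PySem.List.slice word none (some k)))
  then "Female"
  else "N/A"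

def predict_resume_gender_alt (resume : String) : Int × Int :=
  let genders := (PySem.Chars.split₀ resume.toList).map (fun w => pvClassify (PySem.Chars.lower w))
  ((genders.count "Male" : Int), (genders.count "Female" : Int))

-- ===== PRECONDITION & SPEC =====
def Spec_predict_resume_gender (resume : String) (out : Int × Int) : Prop := out = predict_resume_gender_alt resume
instance (resume : String) (out : Int × Int) : Decidable (Spec_predict_resume_gender resume out) := by unfold Spec_predict_resume_gender; infer_instance

-- ===== CLAIM (what is proved, stated in full; the proofs are below) =====
def Claim_equal_predict_resume_gender : Prop := ∀ (resume : String), Dom_predict_resume_gender resume → Spec_predict_resume_gender resume (predict_resume_gender resume)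

-- ===== LEMMAS AND PROOFS =====

-- B's split-built vocab sets list exactly A's set-literal elements, in order
set_option maxRecDepth 1000000 in
set_option maxHeartbeats 4000000 in
lemma pv_male_vocab_eq : pvMaleVocab = pvMaleWords := by rfl

set_option maxRecDepth 1000000 in
set_option maxHeartbeats 4000000 in
lemma pv_female_vocab_eq : pvFemaleVocab = pvFemaleWords := by rfl

set_option maxRecDepth 100000 in
lemma pv_maxlen : pvMaxLen = 14 := by
  unfold pvMaxLen
  rw [pv_male_vocab_eq, pv_female_vocab_eq]
  decide

-- the two prefix tests agree: scanning the prefix set L for a prefix of `word` equals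
-- probing word[:k] (k = 1..N) for membership in L, provided every p ∈ L has 1 ≤ |p| ≤ N
lemma pv_cond_eq (L : PySem.Set (List Char)) (N : Nat)
    (hL : ∀ p ∈ L, 1 ≤ p.length ∧ p.length ≤ N) (word : List Char) :
    L.any (fun p =>
        decide (p.length ≤ word.length) && (PySem.List.slice word none (some (p.length : Int)) == p))
    = (PySem.List.pyRange 1 ((N : Int) + 1) 1).any (fun k =>
        PySem.Set.contains L (PySem.List.slice word none (some k))) := by
  rw [Bool.eq_iff_iff]
  simp only [List.any_eq_true, Bool.and_eq_true, decide_eq_true_eq, beq_iff_eq,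
    PySem.Set.contains_iff, PySem.List.mem_pyRange_one]
  constructor
  · rintro ⟨p, hp, hle, hsl⟩
    obtain ⟨h1, h2⟩ := hL p hp
    refine ⟨(p.length : Int), ⟨by exact_mod_cast h1, by omega⟩, ?_⟩
    rw [hsl]; exact hp
  · rintro ⟨k, ⟨hk1, hk2⟩, hmem⟩
    have hk0 : 0 ≤ k := by omega
    rw [PySem.List.slice_to _ hk0] at hmem
    refine ⟨word.take k.toNat, hmem, ?_, ?_⟩
    · simp [List.length_take]
    · have hlen : (word.take k.toNat).length = min k.toNat word.length := List.length_take
      rw [hlen, PySem.List.slice_to_natCast]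
      exact (List.take_eq_take_min).symm

set_option maxRecDepth 100000 in
lemma pv_word_eq (word : List Char) : pvPredictWordGender word = pvClassify word := by
  have hM : ∀ p ∈ pvMaleWords, 1 ≤ p.length ∧ p.length ≤ 14 := by decide
  have hF : ∀ p ∈ pvFemaleWords, 1 ≤ p.length ∧ p.length ≤ 14 := by decide
  unfold pvPredictWordGender pvClassify
  rw [pv_male_vocab_eq, pv_female_vocab_eq, pv_maxlen,
      pv_cond_eq pvMaleWords 14 hM word, pv_cond_eq pvFemaleWords 14 hF word]

lemma pv_fold_counts (ws : List (List Char)) (m f : Int) :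
    ws.foldl
      (fun (mf : Int × Int) w =>
        let word := PySem.Chars.lower w
        let result := pvPredictWordGender word
        if result = "Male" then (mf.1 + 1, mf.2)
        else if result = "Female" then (mf.1, mf.2 + 1)
        else mf)
      (m, f)
    = (m + ((ws.map (fun w => pvClassify (PySem.Chars.lower w))).count "Male" : Int),
       f + ((ws.map (fun w => pvClassify (PySem.Chars.lower w))).count "Female" : Int)) := by
  induction ws generalizing m f with
  | nil => simp
  | cons w ws ih =>
    rw [List.foldl_cons]
    have hstep : (let word := PySem.Chars.lower w
        let result := pvPredictWordGender word
        if result = "Male" then ((m, f).1 + 1, (m, f).2)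
        else if result = "Female" then ((m, f).1, (m, f).2 + 1) else (m, f))
        = (if pvClassify (PySem.Chars.lower w) = "Male" then (m + 1, f)
           else if pvClassify (PySem.Chars.lower w) = "Female" then (m, f + 1) else (m, f)) := by
      simp [pv_word_eq]
    rw [hstep]
    by_cases h1 : pvClassify (PySem.Chars.lower w) = "Male"
    · rw [if_pos h1, ih]
      simp [h1, Prod.ext_iff]
      omega
    · by_cases h2 : pvClassify (PySem.Chars.lower w) = "Female"
      · rw [if_neg h1, if_pos h2, ih]
        simp [h2, Prod.ext_iff]
        omega
      · rw [if_neg h1, if_neg h2, ih]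
        simp [h1, h2]

-- ===== VERDICT (by name: the statement is the Claim_ definition above) =====
theorem predict_resume_gender_spec : Claim_equal_predict_resume_gender := by
  intro resume _
  unfold Spec_predict_resume_gender predict_resume_gender predict_resume_gender_alt
  rw [pv_fold_counts]
  simp
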